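-- pv_equiv track=rewrite | github.com/lexust1/code4fun | Python/mfti_algos/lec14_03_exam2/ex09_b_function.py | calculate_unique_substring
-- ===== SOURCE A (Python) =====
-- def z_func(s, n):
--     """
--     Вычисляет Z-функцию для строки.
--
--     Args:
--     s (str): Строка, для которой вычисляется Z-функция.
--
--     Returns:
--     list: Список, содержащий значения Z-функции для каждого индекса строки.
--     """
--     n = len(s)  # Определяем длину строки s
--     z = [0] * n  # Создаем массив Z-функции длины n, инициализированный нулями
--     l, r = 0, 0  # Устанавливаем начальные границы самого правого отрезка совпадения
--     for i in range(1, n):  # Итерируемся по всем позициям строки, начиная со второй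
--         if i <= r:  # Проверяем, находится ли текущая позиция i в пределах отрезка [l; r]
--             # Инициализируем z[i] меньшим из двух значений:
--             # 1. r - i + 1: Максимальное количество символов, которое может совпадать с началом строки,
--             #    начиная с позиции i, на основе уже известных данных.
--             # 2. z[i - l]: Соответствующее значение Z-функции из предыдущего совпадения.
--             # Это предотвращает необходимость в повторных сравнениях символов.
--             z[i] = min(r - i + 1, z[i - l])
--         # Продолжаем сравнивать символы после предполагаемого совпадения до тех пор,
--         # пока они совпадают и пока не достигнут конца строки
--         while i + z[i] < n and s[z[i]] == s[i + z[i]]: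
--             z[i] += 1
--         if i + z[i] - 1 > r:  # Если новый отрезок совпадения выходит за границу r
--             l, r = i, i + z[i] - 1  # Обновляем границы самого правого отрезка совпадения
--     return z
--
-- def find_occurrences(s1, s2):
--     """
--     Находит все вхождения строки s2 в строке s1.
--
--     Args:
--     s1 (str): Строка, в которой ищутся вхождения.
--     s2 (str): Подстрока, вхождения которой ищутся в s1.
--
--     Returns:
--     list: Список индексов, на которых начинаются вхождения s2 в s1.
--     """
--     concatenated = s2 + "#" + s1  # Объединяем строки с уникальным разделителем
--     z = z_func(concatenated, len(concatenated))  # Вычисляем Z-функцию для объединенной строки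
--     len_s2 = len(s2)  # Длина искомой подстроки s2
--     occurrences = []  # Список для хранения индексов вхождений
--
--     # Проходим по Z-функции, начиная с индекса, следующего за s2 и разделителем
--     for i in range(len_s2 + 1, len(concatenated)):
--         # Проверяем, совпадает ли значение Z-функции с длиной s2
--         # и соответствует ли найденная подстрока s2
--         if z[i] == len_s2 and concatenated[i : i + z[i]] == s2:
--             # Добавляем индекс начала вхождения в s1
--             occurrences.append(i - (len_s2 + 1))
--     return occurrences
--
-- def calculate_unique_substring(s):
--     """
--     Вычисляет длину максимальной особенной подстроки в данной строке.
--
--     Особенная подстрока определяется как подстрока, которая одновременно является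
--     префиксом и суффиксом данной строки и встречается в ней как минимум три раза.
--
--     Args:
--     s (str): Строка для поиска особенной подстроки.
--
--     Returns:
--     int: Длина максимальной особенной подстроки. Возвращает 0, если таковая не найдена.
--     """
--     if len(s) < 3:
--         # Если длина строки меньше трех, особенной подстроки не существует
--         return 0
--     end = len(s)
--     # Список для хранения длин всех найденных особенных подстрок
--     lengths = []
--     # Итерируемся по всем возможным длинам подстрок
--     for i in range(1, end + 1 - 2):
--         prefix = s[:i]  # Выделяем префикс текущей длины
--         suffix = s[-i:]  # Выделяем суффикс текущей длины
--         # Проверяем, является ли подстрока одновременно префиксом и суффиксом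
--         # и что длина префикса не равна длине строки (тогда 3 включение не войдет)
--         if prefix == suffix and len(prefix) != len(s):
--             # Находим все вхождения подстроки в строку
--             occurrences = find_occurrences(s, prefix)
--             # Проверяем условие наличия минимум трех вхождений
--             if len(occurrences) >= 3:
--                 # Добавляем длину подстроки в список
--                 lengths.append(len(prefix))
--     # Возвращаем максимальную длину из найденных подстрок или 0, если таковых нет
--     return max(lengths) if lengths else 0
-- ===== SOURCE B (Python) =====
-- def calculate_unique_substring(s):
--     n = len(s)
--     if n < 3:
--         return 0
--     # Z-function of s itself (z[i] = length of the longest common prefix of s and s[i:])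
--     z = [0] * n
--     l, r = 0, 0
--     for i in range(1, n):
--         if i <= r:
--             z[i] = min(r - i + 1, z[i - l])
--         while i + z[i] < n and s[z[i]] == s[i + z[i]]:
--             z[i] += 1
--         if i + z[i] - 1 > r:
--             l, r = i, i + z[i] - 1
--     # A length-L prefix is also a suffix iff z[n - L] == L, and the number of
--     # occurrences of s[:L] in s is 1 + #{i >= 1 : z[i] >= L}.  Scan L downwards
--     # and return the first (largest) qualifying length.
--     for L in range(n - 2, 0, -1):
--         if z[n - L] == L and 1 + sum(1 for i in range(1, n) if z[i] >= L) >= 3: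
--             return L
--     return 0
-- ===== Notes on version B (the rewrite author's own statement) =====
-- stated objective: faster
-- what changed: B computes a single Z-function of s itself and reads both the border test (z[n-L]==L) and the occurrence count (1 + #{i>=1 : z[i]>=L}) from it, scanning candidate lengths from the largest down with an early return, instead of A's per-length prefix/suffix slicing plus a fresh Z-function over prefix+'#'+s for every border candidate.
-- intended difference: On strings that contain A's sentinel hash character right after an occurrence of the best border - i.e. when the maximal length L with prefix=suffix and at least three occurrences owes its count to occurrences immediately followed by that character, and no larger length still qualifies under A's censored count - A returns a smaller value because its z==len test misses those occurrences, while B returns the true maximal length (witness: A("a#aba")=0, B("a#aba")=1). — e.g. on calculate_unique_substring("a#aba"): A returns 0, B returns 1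
import Mathlib
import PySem

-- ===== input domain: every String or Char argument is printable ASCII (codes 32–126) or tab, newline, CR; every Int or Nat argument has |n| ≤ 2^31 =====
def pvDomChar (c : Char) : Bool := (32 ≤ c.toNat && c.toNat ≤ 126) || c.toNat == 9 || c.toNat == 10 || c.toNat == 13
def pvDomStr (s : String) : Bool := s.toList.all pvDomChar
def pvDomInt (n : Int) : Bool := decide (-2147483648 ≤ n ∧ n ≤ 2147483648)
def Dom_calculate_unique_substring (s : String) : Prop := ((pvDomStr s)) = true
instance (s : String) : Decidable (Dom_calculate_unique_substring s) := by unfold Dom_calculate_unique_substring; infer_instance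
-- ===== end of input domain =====

-- B replaces A's per-candidate slicing and per-candidate Z-function over prefix+'#'+s by ONE
-- Z-function over s, reading borders and occurrence counts from it, scanning lengths downwards.

-- ===== PORT A =====
-- the `while` loop of z_func: extend z[i] while s[z[i]] == s[i+z[i]] (Option-equality = char
-- equality in range); the fuel argument n bounds the iteration count (the loop stops at i+k = n)
def pvExtend (s : List Char) (n i : Nat) : Nat → Nat → Nat
  | 0, k => k
  | f + 1, k => if i + k < n ∧ s[k]? = s[i + k]? then pvExtend s n i f (k + 1) else k

-- one iteration of z_func's `for i in range(1, n)` over the state (z, l, r)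
def pvZStep (s : List Char) (n : Nat) (st : List Nat × Nat × Nat) (i : Nat) : List Nat × Nat × Nat :=
  let z := st.1
  let l := st.2.1
  let r := st.2.2
  let k0 := if i ≤ r then min (r - i + 1) (z.getD (i - l) 0) else z.getD i 0
  let k := pvExtend s n i n k0
  let z' := z.set i k
  if r < i + k - 1 then (z', i, i + k - 1) else (z', l, r)

def pvZfun (s : List Char) : List Nat :=
  ((List.range' 1 (s.length - 1)).foldl (pvZStep s s.length) (List.replicate s.length 0, 0, 0)).1

-- find_occurrences s1 s2 (concatenated[i:i+z[i]] is take/drop; indices are in range, so exact)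
def pvFindOcc (s1 s2 : List Char) : List Nat :=
  let cat := s2 ++ '#' :: s1
  let z := pvZfun cat
  let len2 := s2.length
  (List.range' (len2 + 1) (cat.length - (len2 + 1))).foldl
    (fun acc i =>
      if z.getD i 0 = len2 ∧ (cat.drop i).take (z.getD i 0) = s2 then acc ++ [i - (len2 + 1)]
      else acc) []

-- main loop; s[:i] = take i, s[-i:] = drop (n-i) (exact because 1 ≤ i ≤ n)
def calculate_unique_substring (s : String) : Int :=
  let cs := s.toList
  let n := cs.length
  if n < 3 then 0
  else
    let lengths := (List.range' 1 (n - 2)).foldl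
      (fun acc i =>
        let pre := cs.take i
        let suf := cs.drop (n - i)
        if pre = suf ∧ pre.length ≠ n then
          if 3 ≤ (pvFindOcc cs pre).length then acc ++ [i] else acc
        else acc) []
    ((lengths.max?).getD 0 : Nat)

-- ===== PORT B =====
-- sum(1 for i in range(1, n) if z[i] >= L)   (z has length n, so z[1:] is exactly that index range)
def pvBCount (z : List Nat) (L : Nat) : Nat := (z.drop 1).countP (fun v => decide (L ≤ v))

-- `for L in range(n-2, 0, -1): if cond: return L` / `return 0`, as recursion on L
def pvBDesc (z : List Nat) (n : Nat) : Nat → Nat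
  | 0 => 0
  | L + 1 =>
    if z.getD (n - (L + 1)) 0 = L + 1 ∧ 3 ≤ 1 + pvBCount z (L + 1) then L + 1
    else pvBDesc z n L

def calculate_unique_substring_alt (s : String) : Int :=
  let cs := s.toList
  let n := cs.length
  if n < 3 then 0
  else
    let z := pvZfun cs
    (pvBDesc z n (n - 2) : Nat)

-- ===== PRECONDITION & SPEC =====
-- input-level vocabulary for D_ (does not touch either port):
-- the length-L prefix is also a suffix
def pvBorder (cs : List Char) (L : Nat) : Bool := cs.take L == cs.drop (cs.length - L)
-- the length-L prefix occurs at position j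
def pvMatch (cs : List Char) (j L : Nat) : Bool := (cs.drop j).take L == cs.take L
-- … and that occurrence is not immediately followed by '#'
def pvOkMatch (cs : List Char) (j L : Nat) : Bool := pvMatch cs j L && !(cs[j + L]? == some '#')
def pvTrueCount (cs : List Char) (L : Nat) : Nat := (List.range cs.length).countP (fun j => pvMatch cs j L)
def pvCensCount (cs : List Char) (L : Nat) : Nat := (List.range cs.length).countP (fun j => pvOkMatch cs j L)

-- On strings containing '#' where the best length L with prefix = suffix and ≥ 3 occurrences owes its
-- count to occurrences followed by '#', A's sentinel '#' collides with the text (its z == len test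
-- misses those occurrences), so A returns a smaller value; B returns the true maximal length.
def D_calculate_unique_substring (s : String) : Prop :=
  '#' ∈ s.toList ∧ ∃ L ∈ List.range (s.toList.length - 1),
    1 ≤ L ∧ pvBorder s.toList L ∧ 3 ≤ pvTrueCount s.toList L ∧ pvCensCount s.toList L < 3 ∧
      ∀ L' ∈ List.range (s.toList.length - 1), L < L' →
        ¬(pvBorder s.toList L' ∧ 3 ≤ pvCensCount s.toList L')
instance (s : String) : Decidable (D_calculate_unique_substring s) := by
  unfold D_calculate_unique_substring; infer_instance

def Spec_calculate_unique_substring (s : String) (out : Int) : Prop :=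
  ¬ D_calculate_unique_substring s → out = calculate_unique_substring_alt s
instance (s : String) (out : Int) : Decidable (Spec_calculate_unique_substring s out) := by
  unfold Spec_calculate_unique_substring; infer_instance

def pvDiffWitness_calculate_unique_substring : String := "a#aba"
def pvDiffWitnessOut_calculate_unique_substring : Int × Int := (0, 1)

-- ===== CLAIM (what is proved, stated in full; the proofs are below) =====
def Claim_unchanged_calculate_unique_substring : Prop := ∀ (s : String), Dom_calculate_unique_substring s → Spec_calculate_unique_substring s (calculate_unique_substring s)
def Claim_changed_calculate_unique_substring : Prop := Dom_calculate_unique_substring (pvDiffWitness_calculate_unique_substring) ∧ D_calculate_unique_substring (pvDiffWitness_calculate_unique_substring) ∧ calculate_unique_substring (pvDiffWitness_calculate_unique_substring) = pvDiffWitnessOut_calculate_unique_substring.1 ∧ calculate_unique_substring_alt (pvDiffWitness_calculate_unique_substring) = pvDiffWitnessOut_calculate_unique_substring.2 ∧ pvDiffWitnessOut_calculate_unique_substring.1 ≠ pvDiffWitnessOut_calculate_unique_substring.2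
def Claim_exact_calculate_unique_substring : Prop := ∀ (s : String), Dom_calculate_unique_substring s → D_calculate_unique_substring s → calculate_unique_substring s ≠ calculate_unique_substring_alt s

-- ===== LEMMAS AND PROOFS =====

-- longest common prefix of two character lists
def lcpLen : List Char → List Char → Nat
  | a :: as, b :: bs => if a = b then lcpLen as bs + 1 else 0
  | _, _ => 0

theorem lcpLen_le_right (xs ys : List Char) : lcpLen xs ys ≤ ys.length := by
  induction xs generalizing ys with
  | nil => cases ys <;> simp [lcpLen]
  | cons a as ih =>
    cases ys with
    | nil => simp [lcpLen]
    | cons b bs =>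
      simp only [lcpLen, List.length_cons]
      split
      · exact Nat.succ_le_succ (ih bs)
      · omega

theorem le_lcpLen_iff (m : Nat) (xs ys : List Char) :
    m ≤ lcpLen xs ys ↔ m ≤ ys.length ∧ xs.take m = ys.take m := by
  induction m generalizing xs ys with
  | zero => simp
  | succ m ih =>
    cases xs with
    | nil =>
      cases ys with
      | nil => simp [lcpLen]
      | cons b bs => simp [lcpLen]
    | cons a as =>
      cases ys with
      | nil => simp [lcpLen]
      | cons b bs =>
        simp only [lcpLen, List.length_cons, List.take_succ_cons]
        split
        · rename_i hab
          subst hab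
          rw [Nat.succ_le_succ_iff, Nat.succ_le_succ_iff, ih]
          simp
        · rename_i hab
          constructor
          · omega
          · rintro ⟨-, h⟩
            exact absurd (List.cons.injEq .. ▸ h).1 hab

theorem getElem?_eq_of_lt_lcpLen {t : Nat} {xs ys : List Char} (h : t < lcpLen xs ys) :
    xs[t]? = ys[t]? := by
  have h2 := (le_lcpLen_iff (t + 1) xs ys).mp h
  calc xs[t]? = (xs.take (t + 1))[t]? := (List.getElem?_take_of_lt (by omega)).symm
    _ = (ys.take (t + 1))[t]? := by rw [h2.2]
    _ = ys[t]? := List.getElem?_take_of_lt (by omega)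

theorem lcpLen_le_left (xs ys : List Char) : lcpLen xs ys ≤ xs.length := by
  induction xs generalizing ys with
  | nil => cases ys <;> simp [lcpLen]
  | cons a as ih =>
    cases ys with
    | nil => simp [lcpLen]
    | cons b bs =>
      simp only [lcpLen, List.length_cons]
      split
      · exact Nat.succ_le_succ (ih bs)
      · omega

theorem succ_le_lcpLen_iff {m : Nat} {xs ys : List Char} (h : m ≤ lcpLen xs ys) :
    m + 1 ≤ lcpLen xs ys ↔ ∃ c, xs[m]? = some c ∧ ys[m]? = some c := by
  constructor
  · intro h1
    have hx : m < xs.length := lt_of_lt_of_le h1 (lcpLen_le_left xs ys)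
    have he := getElem?_eq_of_lt_lcpLen h1
    refine ⟨xs[m], List.getElem?_eq_getElem hx, ?_⟩
    rw [← he]
    exact List.getElem?_eq_getElem hx
  · rintro ⟨c, hx, hy⟩
    have hylen : m < ys.length := (List.getElem?_eq_some_iff.mp hy).1
    have h2 := (le_lcpLen_iff m xs ys).mp h
    rw [le_lcpLen_iff]
    refine ⟨by omega, ?_⟩
    rw [List.take_add_one, List.take_add_one, h2.2, hx, hy]

-- Z-function value, the specification of z_func
def pvZ (cs : List Char) (i : Nat) : Nat := lcpLen cs (cs.drop i)

theorem pvExtend_eq (cs : List Char) (i : Nat) (f k : Nat) (hk : k ≤ pvZ cs i)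
    (hf : pvZ cs i ≤ k + f) : pvExtend cs cs.length i f k = pvZ cs i := by
  induction f generalizing k with
  | zero => simpa [pvExtend] using by omega
  | succ f ih =>
    by_cases hkZ : k = pvZ cs i
    · subst hkZ
      rw [pvExtend, if_neg]
      rintro ⟨hlt, heq⟩
      have hsome : cs[i + pvZ cs i]? = some cs[i + pvZ cs i] := List.getElem?_eq_getElem hlt
      have : pvZ cs i + 1 ≤ pvZ cs i := by
        have := (succ_le_lcpLen_iff (m := pvZ cs i) (xs := cs) (ys := cs.drop i) le_rfl).mpr
        refine this ⟨cs[i + pvZ cs i], by rw [heq]; exact hsome, ?_⟩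
        rw [List.getElem?_drop]
        exact hsome
      omega
    · have hklt : k < pvZ cs i := by omega
      have hn : k < (cs.drop i).length := lt_of_lt_of_le hklt (lcpLen_le_right _ _)
      rw [List.length_drop] at hn
      have heq : cs[k]? = cs[i + k]? := by
        have := getElem?_eq_of_lt_lcpLen hklt
        rwa [List.getElem?_drop] at this
      rw [pvExtend, if_pos ⟨by omega, heq⟩]
      exact ih (k + 1) (by omega) (by omega)

theorem le_lcpLen_of_forall {m : Nat} {xs ys : List Char} (hlen : m ≤ ys.length)
    (h : ∀ t, t < m → xs[t]? = ys[t]?) : m ≤ lcpLen xs ys := by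
  induction m with
  | zero => omega
  | succ m ih =>
    have hm : m ≤ lcpLen xs ys := ih (by omega) (fun t ht => h t (by omega))
    refine (succ_le_lcpLen_iff hm).mpr ⟨ys[m], ?_, List.getElem?_eq_getElem (by omega)⟩
    rw [h m (by omega)]
    exact List.getElem?_eq_getElem (by omega)

theorem pvZ_le (cs : List Char) (i : Nat) : pvZ cs i ≤ cs.length - i := by
  have := lcpLen_le_right cs (cs.drop i)
  rwa [List.length_drop] at this

theorem zLoop_inv (cs : List Char) (h1 : 1 ≤ cs.length) (m : Nat) (hm : m ≤ cs.length - 1) :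
    (((List.range' 1 m).foldl (pvZStep cs cs.length) (List.replicate cs.length 0, 0, 0)).1 =
      (List.range cs.length).map (fun j => if 1 ≤ j ∧ j ≤ m then pvZ cs j else 0))
    ∧ ((List.range' 1 m).foldl (pvZStep cs cs.length) (List.replicate cs.length 0, 0, 0)).2.1 ≤ m
    ∧ ((List.range' 1 m).foldl (pvZStep cs cs.length) (List.replicate cs.length 0, 0, 0)).2.2 < cs.length
    ∧ (((List.range' 1 m).foldl (pvZStep cs cs.length) (List.replicate cs.length 0, 0, 0)).2.1 = 0 →
       ((List.range' 1 m).foldl (pvZStep cs cs.length) (List.replicate cs.length 0, 0, 0)).2.2 = 0)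
    ∧ ∀ u, ((List.range' 1 m).foldl (pvZStep cs cs.length) (List.replicate cs.length 0, 0, 0)).2.1 + u ≤
        ((List.range' 1 m).foldl (pvZStep cs cs.length) (List.replicate cs.length 0, 0, 0)).2.2 →
        cs[u]? = cs[((List.range' 1 m).foldl (pvZStep cs cs.length) (List.replicate cs.length 0, 0, 0)).2.1 + u]? := by
  induction m with
  | zero =>
    refine ⟨?_, by simp, by simpa using h1, by simp, ?_⟩
    · simp only [List.range'_zero, List.foldl_nil]
      rw [List.map_congr_left (g := fun _ => 0) (by intro j _; simp; omega)]
      simp [List.map_const']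
    · intro u hu
      simp only [List.range'_zero, List.foldl_nil] at hu ⊢
      have : u = 0 := by omega
      simp [this]
  | succ m ih =>
    obtain ⟨hz, hl, hr, h0, hmatch⟩ := ih (by omega)
    rw [List.range'_1_concat, List.foldl_append] at *
    set st := (List.range' 1 m).foldl (pvZStep cs cs.length) (List.replicate cs.length 0, 0, 0) with hst
    obtain ⟨z, l, r⟩ := st
    simp only [List.foldl_cons, List.foldl_nil] at *
    have hgetD : ∀ j, z.getD j 0 = if 1 ≤ j ∧ j ≤ m ∧ j < cs.length then pvZ cs j else 0 := by
      intro j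
      rw [hz]
      by_cases hj : j < cs.length
      · rw [List.getD_eq_getElem?_getD, List.getElem?_map, List.getElem?_range hj]
        simp only [Option.map_some, Option.getD_some]
        by_cases hc : 1 ≤ j ∧ j ≤ m <;> simp [hc] <;> omega
      · rw [List.getD_eq_getElem?_getD, List.getElem?_map, List.getElem?_eq_none (by simpa using hj)]
        simp
        omega
    -- the new index
    have hi1 : 1 ≤ 1 + m := by omega
    have hiltn : 1 + m < cs.length := by omega
    simp only [pvZStep]
    -- k0 ≤ pvZ cs (1+m)
    have hk0 : (if 1 + m ≤ r then min (r - (1 + m) + 1) (z.getD (1 + m - l) 0)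
        else z.getD (1 + m) 0) ≤ pvZ cs (1 + m) := by
      by_cases hir : 1 + m ≤ r
      · rw [if_pos hir]
        have hl1 : 1 ≤ l := by
          by_contra hc
          have : l = 0 := by omega
          have := h0 this
          omega
        have hill : 1 ≤ 1 + m - l ∧ 1 + m - l ≤ m ∧ 1 + m - l < cs.length := by omega
        rw [hgetD, if_pos hill]
        refine le_lcpLen_of_forall (by rw [List.length_drop]; omega) ?_
        intro t ht
        have ht1 : t < pvZ cs (1 + m - l) := by omega
        have ht2 : t < r - (1 + m) + 1 := by omega
        have e1 : cs[t]? = cs[1 + m - l + t]? := by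
          have := getElem?_eq_of_lt_lcpLen ht1
          rwa [List.getElem?_drop] at this
        have e2 : cs[1 + m - l + t]? = cs[1 + m + t]? := by
          have := hmatch (1 + m - l + t) (by omega)
          rw [this]
          congr 1
          omega
        rw [List.getElem?_drop, e1, e2]
      · rw [if_neg hir, hgetD, if_neg (by omega)]
        omega
    set k0 := (if 1 + m ≤ r then min (r - (1 + m) + 1) (z.getD (1 + m - l) 0)
        else z.getD (1 + m) 0) with hk0def
    have hext : pvExtend cs cs.length (1 + m) cs.length k0 = pvZ cs (1 + m) := by
      refine pvExtend_eq cs (1 + m) cs.length k0 hk0 ?_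
      have := pvZ_le cs (1 + m)
      omega
    rw [hext]
    have hZle : pvZ cs (1 + m) ≤ cs.length - (1 + m) := pvZ_le cs (1 + m)
    have hznew : z.set (1 + m) (pvZ cs (1 + m)) =
        (List.range cs.length).map (fun j => if 1 ≤ j ∧ j ≤ m + 1 then pvZ cs j else 0) := by
      apply List.ext_getElem?
      intro j
      rw [List.getElem?_set, hz, List.getElem?_map, List.getElem?_map]
      by_cases hj : j < cs.length
      · rw [List.getElem?_range hj]
        by_cases hji : 1 + m = j
        · subst hji
          simp [hiltn, (by omega : (1:Nat) ≤ 1 + m), (by omega : 1 + m ≤ m + 1)]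
        · rw [if_neg hji]
          simp only [Option.map_some]
          by_cases hc : 1 ≤ j ∧ j ≤ m <;> by_cases hc' : 1 ≤ j ∧ j ≤ m + 1 <;>
            simp [hc, hc'] <;> omega
      · have hge : cs.length ≤ j := by omega
        rw [List.getElem?_eq_none (by simpa using hge), if_neg (by omega : ¬ 1 + m = j)]
        simp
    refine ⟨?_, ?_, ?_, ?_, ?_⟩
    · split <;> exact hznew
    · split <;> dsimp only <;> omega
    · split <;> dsimp only <;> omega
    · split <;> dsimp only <;> omega
    · intro u
      split
      · dsimp only
        intro hu
        have hult : u < pvZ cs (1 + m) := by omega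
        have := getElem?_eq_of_lt_lcpLen (xs := cs) (ys := cs.drop (1 + m)) hult
        rwa [List.getElem?_drop] at this
      · dsimp only
        exact hmatch u

theorem pvZfun_spec (cs : List Char) (h1 : 1 ≤ cs.length) :
    pvZfun cs = (List.range cs.length).map (fun j => if 1 ≤ j then pvZ cs j else 0) := by
  have := (zLoop_inv cs h1 (cs.length - 1) le_rfl).1
  rw [pvZfun, this]
  apply List.map_congr_left
  intro j hj
  rw [List.mem_range] at hj
  by_cases hc : 1 ≤ j
  · simp [hc]; omega
  · simp [hc]

-- the Z-values of s2 ++ '#' :: s1 seen by find_occurrences, in terms of the text only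
theorem lcp_cat_eq_iff (pre ys : List Char) (L : Nat) (hpre : pre.length = L) :
    lcpLen (pre ++ '#' :: ys) (ys' : List Char) = L ↔
      (ys'.take L = pre ∧ ys'[L]? ≠ some '#') := by
  have hcatTake : (pre ++ '#' :: ys).take L = pre := List.take_left' hpre
  have hcatL : (pre ++ '#' :: ys)[L]? = some '#' := by
    rw [← hpre, List.getElem?_append_right le_rfl]
    simp
  have ha : L ≤ lcpLen (pre ++ '#' :: ys) ys' ↔ ys'.take L = pre := by
    rw [le_lcpLen_iff, hcatTake]
    constructor
    · exact fun h => h.2.symm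
    · intro h
      refine ⟨?_, h.symm⟩
      have := congrArg List.length h
      simp at this
      omega
  constructor
  · intro h
    have haL : L ≤ lcpLen (pre ++ '#' :: ys) ys' := le_of_eq h.symm
    refine ⟨ha.mp haL, ?_⟩
    intro hcontra
    have : L + 1 ≤ lcpLen (pre ++ '#' :: ys) ys' :=
      (succ_le_lcpLen_iff haL).mpr ⟨'#', hcatL, hcontra⟩
    omega
  · rintro ⟨htake, hhash⟩
    have haL : L ≤ lcpLen (pre ++ '#' :: ys) ys' := ha.mpr htake
    by_contra hne
    have : L + 1 ≤ lcpLen (pre ++ '#' :: ys) ys' := by omega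
    obtain ⟨c, hc1, hc2⟩ := (succ_le_lcpLen_iff haL).mp this
    rw [hcatL] at hc1
    cases hc1
    exact hhash hc2

theorem pvFindOcc_length (cs : List Char) (L : Nat) (h1 : 1 ≤ L) (hL : L ≤ cs.length) :
    (pvFindOcc cs (cs.take L)).length = pvCensCount cs L := by
  have hpre : (cs.take L).length = L := by simp; omega
  unfold pvFindOcc
  dsimp only
  have hcatlen : ((cs.take L) ++ '#' :: cs).length = L + 1 + cs.length := by
    simp [hpre]; omega
  have hfun : (fun (acc : List Nat) (i : Nat) =>
      if (pvZfun ((cs.take L) ++ '#' :: cs)).getD i 0 = (cs.take L).length ∧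
          (((cs.take L) ++ '#' :: cs).drop i).take ((pvZfun ((cs.take L) ++ '#' :: cs)).getD i 0) = cs.take L
        then acc ++ [i - ((cs.take L).length + 1)] else acc) =
      (fun (acc : List Nat) (i : Nat) =>
        if (fun i => decide ((pvZfun ((cs.take L) ++ '#' :: cs)).getD i 0 = (cs.take L).length ∧
          (((cs.take L) ++ '#' :: cs).drop i).take ((pvZfun ((cs.take L) ++ '#' :: cs)).getD i 0) = cs.take L)) i = true
        then acc ++ [(fun i => i - ((cs.take L).length + 1)) i] else acc) := by
    funext acc i
    simp
  rw [hfun, PySem.List.foldl_append_if, List.nil_append, List.length_map,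
    ← List.countP_eq_length_filter]
  have hrange : List.range' ((cs.take L).length + 1) (((cs.take L) ++ '#' :: cs).length - ((cs.take L).length + 1)) =
      (List.range cs.length).map ((L + 1) + ·) := by
    rw [hpre, hcatlen, ← List.range'_eq_map_range]
    congr 1
    omega
  rw [hrange, List.countP_map]
  apply List.countP_congr
  intro j hj
  rw [List.mem_range] at hj
  have hzcat := pvZfun_spec ((cs.take L) ++ '#' :: cs) (by omega)
  have hgd : (pvZfun ((cs.take L) ++ '#' :: cs)).getD (L + 1 + j) 0 =
      pvZ ((cs.take L) ++ '#' :: cs) (L + 1 + j) := by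
    rw [hzcat, List.getD_eq_getElem?_getD, List.getElem?_map,
      List.getElem?_range (by omega : L + 1 + j < ((cs.take L) ++ '#' :: cs).length)]
    simp
  have hdrop : ((cs.take L) ++ '#' :: cs).drop (L + 1 + j) = cs.drop j := by
    have h' : L + 1 + j = (cs.take L).length + (1 + j) := by omega
    rw [h', List.drop_length_add_append, Nat.add_comm 1 j, List.drop_succ_cons]
  -- the per-index condition, rewritten through the Z-specification
  simp only [Function.comp_apply, decide_eq_true_eq, hpre, hgd]
  unfold pvZ
  rw [hdrop]
  have hiff := lcp_cat_eq_iff (cs.take L) cs L hpre (ys' := cs.drop j)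
  simp only [pvOkMatch, pvMatch, Bool.and_eq_true, beq_iff_eq, Bool.not_eq_eq_eq_not,
    Bool.not_true, beq_eq_false_iff_ne]
  constructor
  · rintro ⟨heq, -⟩
    obtain ⟨htake, hhash⟩ := hiff.mp heq
    rw [List.getElem?_drop] at hhash
    exact ⟨htake, hhash⟩
  · rintro ⟨htake, hhash⟩
    have heq : lcpLen ((cs.take L) ++ '#' :: cs) (cs.drop j) = L :=
      hiff.mpr ⟨htake, by rw [List.getElem?_drop]; exact hhash⟩
    refine ⟨heq, ?_⟩
    rw [heq]
    exact htake

-- generic downward scan, the common shape of both results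
def pvDesc (p : Nat → Bool) : Nat → Nat
  | 0 => 0
  | L + 1 => if p (L + 1) then L + 1 else pvDesc p L

theorem pvDesc_le (p : Nat → Bool) (M : Nat) : pvDesc p M ≤ M := by
  induction M with
  | zero => simp [pvDesc]
  | succ M ih =>
    rw [pvDesc]
    split
    · omega
    · omega

theorem max?_elim_append (xs : List Nat) (x a : Nat) :
    ((xs ++ [a]).max?).elim x (max x) = max ((xs.max?).elim x (max x)) a := by
  induction xs generalizing x with
  | nil => simp [List.max?]
  | cons y ys ih =>
    simp only [List.cons_append, List.max?_cons, Option.elim_some]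
    rw [ih]
    omega

theorem max?_getD_append (xs : List Nat) (a : Nat) :
    (xs ++ [a]).max?.getD 0 = max (xs.max?.getD 0) a := by
  cases xs with
  | nil => simp
  | cons x xs =>
    simp only [List.cons_append, List.max?_cons, Option.getD_some]
    exact max?_elim_append xs x a

theorem max_filter_desc (p : Nat → Bool) (M : Nat) :
    (((List.range' 1 M).filter p).max?).getD 0 = pvDesc p M := by
  induction M with
  | zero => simp [pvDesc]
  | succ M ih =>
    rw [List.range'_1_concat, List.filter_append]
    by_cases hp : p (1 + M)
    · simp only [List.filter_cons, List.filter_nil, hp, if_pos]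
      rw [max?_getD_append, ih]
      have := pvDesc_le p M
      have hp' : p (M + 1) = true := by rwa [Nat.add_comm] at hp
      rw [pvDesc, if_pos hp']
      omega
    · simp only [List.filter_cons, List.filter_nil, hp, Bool.false_eq_true, if_false,
        List.append_nil]
      rw [ih, pvDesc, if_neg (by rwa [Nat.add_comm 1 M] at hp)]

theorem A_char (s : String) (h3 : 3 ≤ s.toList.length) :
    calculate_unique_substring s =
      ((pvDesc (fun L => pvBorder s.toList L && decide (3 ≤ pvCensCount s.toList L))
        (s.toList.length - 2) : Nat) : Int) := by
  unfold calculate_unique_substring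
  dsimp only
  rw [if_neg (by omega)]
  have hcong : (List.range' 1 (s.toList.length - 2)).foldl
      (fun acc i =>
        if s.toList.take i = s.toList.drop (s.toList.length - i) ∧ (s.toList.take i).length ≠ s.toList.length then
          if 3 ≤ (pvFindOcc s.toList (s.toList.take i)).length then acc ++ [i] else acc
        else acc) [] =
      (List.range' 1 (s.toList.length - 2)).foldl
        (fun acc i =>
          if (fun L => pvBorder s.toList L && decide (3 ≤ pvCensCount s.toList L)) i = true then
            acc ++ [i] else acc) [] := by
    apply PySem.List.foldl_congr_mem
    intro acc i hi
    rw [List.mem_range'_1] at hi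
    have h1 : 1 ≤ i := hi.1
    have h2 : i ≤ s.toList.length - 2 := by omega
    have hlen : (s.toList.take i).length = i := by rw [List.length_take]; omega
    rw [pvFindOcc_length s.toList i h1 (by omega)]
    by_cases hb : s.toList.take i = s.toList.drop (s.toList.length - i)
    · by_cases hc : 3 ≤ pvCensCount s.toList i
      · rw [if_pos ⟨hb, by omega⟩, if_pos hc, if_pos (by simp [pvBorder, hb, hc])]
      · rw [if_pos ⟨hb, by omega⟩, if_neg hc, if_neg (by simp [pvBorder, hb, hc])]
    · rw [if_neg (by intro hcontra; exact hb hcontra.1),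
        if_neg (by simp [pvBorder]; intro hcontra; exact absurd hcontra hb)]
  rw [hcong, PySem.List.foldl_append_if_eq_filter, List.nil_append, max_filter_desc]

-- every position matches at L = 0 … and for j ≥ 0, matching at j is z[j] ≥ L
theorem match_iff (cs : List Char) (j L : Nat) (hL : L ≤ cs.length) :
    pvMatch cs j L = true ↔ L ≤ lcpLen cs (cs.drop j) := by
  rw [le_lcpLen_iff]
  simp only [pvMatch, beq_iff_eq]
  constructor
  · intro h
    have hlen := congrArg List.length h
    simp at hlen
    exact ⟨by rw [List.length_drop]; omega, h.symm⟩
  · exact fun h => h.2.symm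

theorem trueCount_eq (cs : List Char) (L : Nat) (h1 : 1 ≤ cs.length) (hL : L ≤ cs.length) :
    pvTrueCount cs L = 1 + pvBCount (pvZfun cs) L := by
  have hn : cs.length = (cs.length - 1) + 1 := by omega
  have hdrop1 : (pvZfun cs).drop 1 = (List.range (cs.length - 1)).map (fun t => pvZ cs (t + 1)) := by
    rw [pvZfun_spec cs h1]
    conv_lhs => rw [hn]
    rw [List.range_succ_eq_map, List.map_cons, List.drop_succ_cons, List.map_map]
    apply List.map_congr_left
    intro t _
    simp [Nat.succ_eq_add_one]
  have htc : pvTrueCount cs L =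
      1 + (List.range (cs.length - 1)).countP (fun t => pvMatch cs (t + 1) L) := by
    unfold pvTrueCount
    conv_lhs => rw [hn]
    rw [List.range_succ_eq_map, List.countP_cons, List.countP_map, if_pos (by simp [pvMatch])]
    rw [Nat.add_comm]
    rfl
  rw [htc]
  unfold pvBCount
  rw [hdrop1, List.countP_map]
  congr 1
  apply List.countP_congr
  intro t _
  simp only [Function.comp_apply, decide_eq_true_eq, pvZ]
  exact (match_iff cs (t + 1) L hL)

theorem B_char (s : String) (h3 : 3 ≤ s.toList.length) :
    calculate_unique_substring_alt s =
      ((pvDesc (fun L => pvBorder s.toList L && decide (3 ≤ pvTrueCount s.toList L))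
        (s.toList.length - 2) : Nat) : Int) := by
  unfold calculate_unique_substring_alt
  dsimp only
  rw [if_neg (by omega)]
  congr 1
  have main : ∀ M, M ≤ s.toList.length - 2 →
      pvBDesc (pvZfun s.toList) s.toList.length M =
        pvDesc (fun L => pvBorder s.toList L && decide (3 ≤ pvTrueCount s.toList L)) M := by
    intro M
    induction M with
    | zero => intro _; rfl
    | succ M ih =>
      intro hM
      rw [pvBDesc, pvDesc, ih (by omega)]
      have hj1 : 1 ≤ s.toList.length - (M + 1) := by omega
      have hjn : s.toList.length - (M + 1) < s.toList.length := by omega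
      have hgd : (pvZfun s.toList).getD (s.toList.length - (M + 1)) 0 =
          pvZ s.toList (s.toList.length - (M + 1)) := by
        rw [pvZfun_spec s.toList (by omega), List.getD_eq_getElem?_getD, List.getElem?_map,
          List.getElem?_range hjn]
        simp only [Option.map_some, Option.getD_some]
        rw [if_pos hj1]
      have hcond : ((pvZfun s.toList).getD (s.toList.length - (M + 1)) 0 = M + 1 ∧
            3 ≤ 1 + pvBCount (pvZfun s.toList) (M + 1)) ↔
          (pvBorder s.toList (M + 1) && decide (3 ≤ pvTrueCount s.toList (M + 1))) = true := by
        rw [hgd, ← trueCount_eq s.toList (M + 1) (by omega) (by omega)]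
        have hdlen : (s.toList.drop (s.toList.length - (M + 1))).length = M + 1 := by
          rw [List.length_drop]; omega
        have hub := lcpLen_le_right s.toList (s.toList.drop (s.toList.length - (M + 1)))
        rw [hdlen] at hub
        have hto : (s.toList.drop (s.toList.length - (M + 1))).take (M + 1) =
            s.toList.drop (s.toList.length - (M + 1)) :=
          List.take_of_length_le (by rw [List.length_drop]; omega)
        have hzeq : pvZ s.toList (s.toList.length - (M + 1)) = M + 1 ↔
            pvBorder s.toList (M + 1) = true := by
          simp only [pvZ, pvBorder, beq_iff_eq]
          constructor
          · intro h
            have h' : M + 1 ≤ lcpLen s.toList (s.toList.drop (s.toList.length - (M + 1))) := by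
              omega
            have h2 := (le_lcpLen_iff _ _ _).mp h'
            rw [hto] at h2
            exact h2.2
          · intro h
            have h' : M + 1 ≤ lcpLen s.toList (s.toList.drop (s.toList.length - (M + 1))) := by
              rw [le_lcpLen_iff]
              refine ⟨by rw [List.length_drop]; omega, ?_⟩
              rw [hto]
              exact h
            omega
        simp only [Bool.and_eq_true, decide_eq_true_eq]
        rw [hzeq]
      by_cases hc : (pvZfun s.toList).getD (s.toList.length - (M + 1)) 0 = M + 1 ∧
          3 ≤ 1 + pvBCount (pvZfun s.toList) (M + 1)
      · rw [if_pos hc, if_pos (hcond.mp hc)]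
      · rw [if_neg hc, if_neg (fun h => hc (hcond.mpr h))]
  exact main (s.toList.length - 2) le_rfl

theorem pvDesc_congr (pA pB : Nat → Bool) (M : Nat)
    (mono : ∀ L, pA L = true → pB L = true)
    (hD : ∀ L, 1 ≤ L → L ≤ M → pB L = true → pA L = false →
      ∃ L', L < L' ∧ L' ≤ M ∧ pA L' = true) :
    pvDesc pA M = pvDesc pB M := by
  induction M with
  | zero => rfl
  | succ M ih =>
    by_cases hA : pA (M + 1) = true
    · rw [pvDesc, pvDesc, if_pos hA, if_pos (mono _ hA)]
    · have hB : pB (M + 1) = false := by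
        by_contra hc
        obtain ⟨L', hgt, hle, _⟩ := hD (M + 1) (by omega) le_rfl
          (by simpa using hc) (by simpa using hA)
        omega
      rw [pvDesc, pvDesc, if_neg (by simp [hA]), if_neg (by simp [hB])]
      apply ih
      intro L h1 hM hpB hpA
      obtain ⟨L', hgt, hle, hA'⟩ := hD L h1 (by omega) hpB hpA
      refine ⟨L', hgt, ?_, hA'⟩
      rcases Nat.lt_or_ge L' (M + 1) with h | h
      · omega
      · have : L' = M + 1 := by omega
        rw [this] at hA'
        simp [hA'] at hA

theorem pvDesc_ge (p : Nat → Bool) (M L : Nat) (h1 : 1 ≤ L) (hM : L ≤ M) (hp : p L = true) :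
    L ≤ pvDesc p M := by
  induction M with
  | zero => omega
  | succ M ih =>
    rw [pvDesc]
    split
    · omega
    · rename_i hc
      rcases Nat.lt_or_ge L (M + 1) with h | h
      · exact ih (by omega)
      · have : L = M + 1 := by omega
        rw [this] at hp
        simp [hp] at hc

theorem pvDesc_lt (p : Nat → Bool) (M L : Nat) (h1 : 1 ≤ L)
    (h : ∀ L', L ≤ L' → L' ≤ M → p L' = false) : pvDesc p M < L := by
  induction M with
  | zero => simpa [pvDesc] using h1
  | succ M ih =>
    rcases Nat.lt_or_ge M (L - 1) with hM | hM
    · have := pvDesc_le p (M + 1)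
      omega
    · rw [pvDesc, if_neg (by simp [h (M + 1) (by omega) le_rfl])]
      exact ih (fun L' hL hM' => h L' hL (by omega))

-- ===== VERDICT (by name: the statement is the Claim_ definition above) =====
theorem censCount_eq_trueCount_of_no_hash (cs : List Char) (L : Nat) (h : '#' ∉ cs) :
    pvCensCount cs L = pvTrueCount cs L := by
  apply List.countP_congr
  intro j _
  have hne : ¬ cs[j + L]? = some '#' := fun hh => h (List.mem_of_getElem? hh)
  simp [pvOkMatch, hne]

theorem censCount_le_trueCount (cs : List Char) (L : Nat) :
    pvCensCount cs L ≤ pvTrueCount cs L := by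
  apply List.countP_mono_left
  intro j _ hok
  have h' : pvMatch cs j L = true ∧ ¬ cs[j + L]? = some '#' := by
    simpa [pvOkMatch] using hok
  exact h'.1

theorem calculate_unique_substring_spec : Claim_unchanged_calculate_unique_substring := by
  intro s _ hnD
  show calculate_unique_substring s = calculate_unique_substring_alt s
  by_cases h3 : s.toList.length < 3
  · unfold calculate_unique_substring calculate_unique_substring_alt
    dsimp only
    rw [if_pos h3, if_pos h3]
  · rw [A_char s (by omega), B_char s (by omega)]
    congr 1
    apply pvDesc_congr
    · intro L hA
      have hA' : pvBorder s.toList L = true ∧ 3 ≤ pvCensCount s.toList L := by simpa using hA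
      have := censCount_le_trueCount s.toList L
      simp only [Bool.and_eq_true, decide_eq_true_eq]
      exact ⟨hA'.1, by omega⟩
    · intro L h1 hM hpB hpA
      unfold D_calculate_unique_substring at hnD
      have hhash : '#' ∈ s.toList := by
        by_contra hnh
        rw [censCount_eq_trueCount_of_no_hash s.toList L hnh] at hpA
        rw [hpA] at hpB
        cases hpB
      replace hnD : ¬ ∃ L ∈ List.range (s.toList.length - 1),
          1 ≤ L ∧ pvBorder s.toList L ∧ 3 ≤ pvTrueCount s.toList L ∧
            pvCensCount s.toList L < 3 ∧
            ∀ L' ∈ List.range (s.toList.length - 1), L < L' →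
              ¬(pvBorder s.toList L' ∧ 3 ≤ pvCensCount s.toList L') :=
        fun hex => hnD ⟨hhash, hex⟩
      push Not at hnD
      have hpB' : pvBorder s.toList L = true ∧ 3 ≤ pvTrueCount s.toList L := by simpa using hpB
      have hccL : ¬ 3 ≤ pvCensCount s.toList L := by
        intro hcontra
        rw [hpB'.1] at hpA
        simp [hcontra] at hpA
      have hn1 : L ∈ List.range (s.toList.length - 1) := List.mem_range.mpr (by omega)
      have hfail := hnD L hn1 h1 hpB'.1 hpB'.2 (by omega)
      obtain ⟨L', hmem', hlt', hb', hc'⟩ := hfail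
      rw [List.mem_range] at hmem'
      refine ⟨L', hlt', by omega, ?_⟩
      simp only [Bool.and_eq_true, decide_eq_true_eq]
      exact ⟨hb', hc'⟩

theorem calculate_unique_substring_changed : Claim_changed_calculate_unique_substring := by
  unfold Claim_changed_calculate_unique_substring; decide

theorem calculate_unique_substring_tight : Claim_exact_calculate_unique_substring := by
  intro s _ hD
  unfold D_calculate_unique_substring at hD
  obtain ⟨-, L, hmem, h1, hb, htc, hcc, hclause⟩ := hD
  rw [List.mem_range] at hmem
  have h3 : 3 ≤ s.toList.length := by omega
  rw [A_char s h3, B_char s h3]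
  have hge : L ≤ pvDesc (fun L => pvBorder s.toList L && decide (3 ≤ pvTrueCount s.toList L))
      (s.toList.length - 2) := by
    apply pvDesc_ge _ _ L h1 (by omega)
    simp only [Bool.and_eq_true, decide_eq_true_eq]
    exact ⟨hb, htc⟩
  have hltA : pvDesc (fun L => pvBorder s.toList L && decide (3 ≤ pvCensCount s.toList L))
      (s.toList.length - 2) < L := by
    apply pvDesc_lt _ _ L h1
    intro L' hL hM'
    rcases Nat.eq_or_lt_of_le hL with heq | hgt
    · have : ¬ 3 ≤ pvCensCount s.toList L' := by rw [← heq]; omega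
      simp [this]
    · have hnot := hclause L' (List.mem_range.mpr (by omega)) hgt
      by_cases hbL : pvBorder s.toList L' = true
      · have : ¬ 3 ≤ pvCensCount s.toList L' := fun hcc' => hnot ⟨hbL, hcc'⟩
        simp [this]
      · simp [hbL]
  intro hEq
  have := Nat.cast_inj (R := Int) |>.mp hEq
  omega
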